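-- pv_equiv track=rewrite | github.com/KimGaYeong/2021_algorithm | 기능개발.py | solution
-- ===== SOURCE A (Python) =====
-- import math
--
-- def solution(progresses, speeds):
--     lefted = []
--     answer = []
--
--     for i, j in zip(progresses, speeds):
--         # lefted.append((100-i)/j) -> 소수점 고려 안하면 2번 tc 오류
--         # lefted.append(int((100 - i)/j)) -> 몫으로 구하면 11번 tc 오류
--         lefted.append(math.ceil((100-i)/j))
--     l = len(lefted)
--     top, count = 0, 0
--     for i in range(l):
--         if(lefted[top] < lefted[i]):
--             answer.append(count)
--             top = i
--             count =1
--         else :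
--             count +=1
--     answer.append(count)
--     return answer
-- ===== SOURCE B (Python) =====
-- import math
--
-- def solution(progresses, speeds):
--     # day each feature finishes
--     days = [math.ceil((100 - p) / s) for p, s in zip(progresses, speeds)]
--     # running maximum: constant within each deployment group, jumps at boundaries
--     runmax = []
--     m = None
--     for d in days:
--         m = d if m is None else max(m, d)
--         runmax.append(m)
--     # run-length encode the running-maximum sequence
--     counts = []
--     last = None
--     for v in runmax:
--         if last is not None and v == last:
--             counts[-1] += 1
--         else:
--             counts.append(1)
--         last = v
--     return counts
-- ===== Notes on version B (the rewrite author's own statement) =====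
-- stated objective: alternative
-- what changed: A keeps an index 'top' of the current group leader and compares lefted[top] against each element in one indexed loop; B instead builds the running maximum of the completion-day list and run-length encodes it, so groups are runs of equal running maximum.
-- outside the precondition, e.g. on solution([], []): A returns [0], B returns []
import Mathlib
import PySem

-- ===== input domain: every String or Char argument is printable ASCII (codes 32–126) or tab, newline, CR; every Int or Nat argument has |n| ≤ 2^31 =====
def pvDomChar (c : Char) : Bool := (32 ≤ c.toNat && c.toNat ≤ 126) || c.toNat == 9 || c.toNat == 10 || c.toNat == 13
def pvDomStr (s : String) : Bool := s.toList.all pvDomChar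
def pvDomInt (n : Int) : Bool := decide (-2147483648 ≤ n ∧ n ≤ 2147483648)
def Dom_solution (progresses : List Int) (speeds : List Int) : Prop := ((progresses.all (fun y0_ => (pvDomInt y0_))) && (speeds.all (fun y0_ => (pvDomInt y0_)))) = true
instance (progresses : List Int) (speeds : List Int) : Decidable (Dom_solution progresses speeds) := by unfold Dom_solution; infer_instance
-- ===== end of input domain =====

-- B replaces A's indexed leader-tracking loop by running-maximum + run-length encoding (alternative decomposition, same cost).

-- ===== PORT A =====
-- math.ceil((100-p)/s): on the stated |int| ≤ 2^31 domain the float division is exact enough that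
-- the ceiling equals exact ceiling division -((-(100-p)) // s); ported as such (exact on Dom).
def pvDay (p s : Int) : Int := -(PySem.Int.floordiv (-(100 - p)) s)

def solution (progresses : List Int) (speeds : List Int) : List Int :=
  let lefted := (List.zip progresses speeds).map (fun ij => pvDay ij.1 ij.2)
  let l := lefted.length
  let st := (List.range l).foldl
    (fun (acc : List Int × Nat × Int) i =>
      if lefted.getD acc.2.1 0 < lefted.getD i 0 then (acc.1 ++ [acc.2.2], i, 1)
      else (acc.1, acc.2.1, acc.2.2 + 1))
    ([], 0, 0)
  st.1 ++ [st.2.2]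

-- ===== PORT B =====
-- loop "for d in days: m = d if m is None else max(m, d); runmax.append(m)"
def pvRunMax : List Int × Option Int → List Int → List Int × Option Int
  | st, [] => st
  | (run, m), d :: rest =>
      let m' := match m with | none => d | some m0 => max m0 d
      pvRunMax (run ++ [m'], some m') rest

-- counts[-1] += 1
def pvIncLast : List Int → List Int
  | [] => []
  | [c] => [c + 1]
  | c :: c' :: cs => c :: pvIncLast (c' :: cs)

-- loop "for v in runmax: if last is not None and v == last: counts[-1] += 1 else: counts.append(1); last = v"
def pvCounts : List Int × Option Int → List Int → List Int
  | st, [] => st.1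
  | (counts, last), v :: rest =>
      if last = some v then pvCounts (pvIncLast counts, some v) rest
      else pvCounts (counts ++ [1], some v) rest

def solution_alt (progresses : List Int) (speeds : List Int) : List Int :=
  let days := (List.zip progresses speeds).map (fun ij => pvDay ij.1 ij.2)
  let runmax := (pvRunMax ([], none) days).1
  pvCounts ([], none) runmax

-- ===== PRECONDITION & SPEC =====
-- Pre_ excludes (a) zero speeds among the zipped pairs, where A raises ZeroDivisionError, and
-- (b) inputs whose zip is empty, where A's unconditional trailing append returns [0] while B's
-- natural run-length encoding returns [] — a defensible unspecified corner.
def Pre_solution (progresses : List Int) (speeds : List Int) : Prop :=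
  List.zip progresses speeds ≠ [] ∧ ∀ v ∈ speeds.take progresses.length, v ≠ 0
instance (progresses : List Int) (speeds : List Int) : Decidable (Pre_solution progresses speeds) := by
  unfold Pre_solution; infer_instance

def pvWitness_solution : List Int × List Int := ([93, 30, 55], [1, 30, 5])

def Spec_solution (progresses : List Int) (speeds : List Int) (out : List Int) : Prop := out = solution_alt progresses speeds
instance (progresses : List Int) (speeds : List Int) (out : List Int) : Decidable (Spec_solution progresses speeds out) := by unfold Spec_solution; infer_instance

-- ===== CLAIM (what is proved, stated in full; the proofs are below) =====
def Claim_equal_solution : Prop := ∀ (progresses : List Int) (speeds : List Int), Dom_solution progresses speeds → Pre_solution progresses speeds → Spec_solution progresses speeds (solution progresses speeds)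

-- ===== LEMMAS AND PROOFS =====

-- Common abstract form both sides reduce to: remaining answer entries from current group
-- maximum m and current count c over the remaining completion days.
def loopV : Int → Int → List Int → List Int
  | _, c, [] => [c]
  | m, c, x :: xs => if m < x then c :: loopV x 1 xs else loopV m (c + 1) xs

-- running maxima of ds starting from current maximum m
def accM : Int → List Int → List Int
  | _, [] => []
  | m, d :: ds => (max m d) :: accM (max m d) ds

-- A's fold body and result shape, factored for the lemmas (definitionally A's loop)
def pvFoldAStep (L : List Int) (acc : List Int × Nat × Int) (i : Nat) : List Int × Nat × Int :=
  if L.getD acc.2.1 0 < L.getD i 0 then (acc.1 ++ [acc.2.2], i, 1)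
  else (acc.1, acc.2.1, acc.2.2 + 1)

def pvFoldA (L : List Int) : List Int :=
  ((List.range L.length).foldl (pvFoldAStep L) ([], 0, 0)).1
    ++ [((List.range L.length).foldl (pvFoldAStep L) ([], 0, 0)).2.2]

theorem solution_eq_pvFoldA (p s : List Int) :
    solution p s = pvFoldA ((List.zip p s).map (fun ij => pvDay ij.1 ij.2)) := rfl

theorem foldA_inv (L : List Int) (k : Nat) : ∀ (j top : Nat) (ans : List Int) (c : Int),
    j + k = L.length → top < L.length →
    (((List.range' j k).foldl (pvFoldAStep L) (ans, top, c)).1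
      ++ [((List.range' j k).foldl (pvFoldAStep L) (ans, top, c)).2.2])
      = ans ++ loopV (L.getD top 0) c (L.drop j) := by
  induction k with
  | zero =>
      intro j top ans c hj htop
      have : j = L.length := by omega
      simp [this, loopV]
  | succ k ih =>
      intro j top ans c hj htop
      have hjlt : j < L.length := by omega
      rw [List.range'_succ]
      simp only [List.foldl_cons]
      rw [List.drop_eq_getElem_cons hjlt]
      have hgj : L.getD j 0 = L[j] := List.getD_eq_getElem L 0 hjlt
      by_cases hlt : L.getD top 0 < L.getD j 0
      · rw [show pvFoldAStep L (ans, top, c) j = (ans ++ [c], j, 1) by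
          simp only [pvFoldAStep, if_pos hlt]]
        rw [ih (j + 1) j (ans ++ [c]) 1 (by omega) hjlt]
        rw [hgj] at hlt
        simp only [loopV, hgj, if_pos hlt, List.append_assoc, List.cons_append, List.nil_append]
      · rw [show pvFoldAStep L (ans, top, c) j = (ans, top, c + 1) by
          simp only [pvFoldAStep, if_neg hlt]]
        rw [ih (j + 1) top ans (c + 1) (by omega) htop]
        rw [hgj] at hlt
        simp only [loopV, if_neg hlt]

theorem pvFoldA_cons (x : Int) (xs : List Int) : pvFoldA (x :: xs) = loopV x 1 xs := by
  unfold pvFoldA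
  rw [List.range_eq_range']
  rw [foldA_inv (x :: xs) (x :: xs).length 0 0 [] 0 (by simp) (by simp)]
  simp only [List.drop_zero, List.getD_cons_zero, List.nil_append]
  simp [loopV]

theorem pvIncLast_append (counts : List Int) (c : Int) :
    pvIncLast (counts ++ [c]) = counts ++ [c + 1] := by
  induction counts with
  | nil => rfl
  | cons a rest ih =>
      cases rest with
      | nil => rfl
      | cons b bs => simpa [pvIncLast] using ih

theorem pvRunMax_inv (ds : List Int) : ∀ (run : List Int) (m : Int),
    pvRunMax (run, some m) ds = (run ++ accM m ds, some (ds.foldl max m)) := by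
  induction ds with
  | nil => intro run m; simp [pvRunMax, accM]
  | cons d rest ih =>
      intro run m
      simp only [pvRunMax, accM, List.foldl_cons]
      rw [ih]
      simp

theorem pvCounts_inv (ds : List Int) : ∀ (counts : List Int) (c m : Int),
    pvCounts (counts ++ [c], some m) (accM m ds) = counts ++ loopV m c ds := by
  induction ds with
  | nil => intro counts c m; simp [accM, pvCounts, loopV]
  | cons d rest ih =>
      intro counts c m
      by_cases hlt : m < d
      · have hmax : max m d = d := by omega
        have hne : m ≠ d := by omega
        simp only [accM, hmax, pvCounts, Option.some.injEq, if_neg hne]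
        rw [ih (counts ++ [c]) 1 d]
        simp [loopV, hlt]
      · have hmax : max m d = m := by omega
        simp only [accM, hmax, pvCounts, if_pos]
        rw [pvIncLast_append, ih counts (c + 1) m]
        simp [loopV, hlt]

theorem alt_eq_loopV (p s : List Int) (x : Int) (xs : List Int)
    (h : (List.zip p s).map (fun ij => pvDay ij.1 ij.2) = x :: xs) :
    solution_alt p s = loopV x 1 xs := by
  unfold solution_alt
  rw [h]
  show pvCounts ([], none) (pvRunMax ([] ++ [x], some x) xs).1 = loopV x 1 xs
  rw [pvRunMax_inv]
  show pvCounts ([], none) (x :: accM x xs) = loopV x 1 xs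
  simp only [pvCounts, reduceCtorEq]
  have := pvCounts_inv xs [] 1 x
  simpa using this

-- ===== VERDICT (by name: the statement is the Claim_ definition above) =====
theorem solution_spec : Claim_equal_solution := by
  intro p s _ hpre
  unfold Spec_solution
  obtain ⟨hz, _⟩ := hpre
  rcases hLc : (List.zip p s).map (fun ij => pvDay ij.1 ij.2) with _ | ⟨x, xs⟩
  · exact absurd (by simpa using hLc) hz
  · rw [solution_eq_pvFoldA, hLc, pvFoldA_cons, alt_eq_loopV p s x xs hLc]
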